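-- pv_equiv track=rewrite | github.com/LukhasAI/Lukhas | fstring_fix.py | simple_expression_ok
-- ===== SOURCE A (Python) =====
-- def simple_expression_ok(s: str) -> bool:
--     """
--     Heuristic gate: Only auto-fix if expressions are "simple".
--     - No nested braces depth > 1
--     - No quotes inside braces
--     """
--     depth = 0
--     in_brace = False
--     i = 0
--     n = len(s)
--     while i < n:
--         c = s[i]
--         # Handle escaped literal braces
--         if c == '{':
--             if i + 1 < n and s[i+1] == '{':
--                 i += 2
--                 continue
--             depth += 1
--             in_brace = True
--             if depth > 1:
--                 return False
--             i += 1
--             continue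
--         if c == '}':
--             if i + 1 < n and s[i+1] == '}':
--                 i += 2
--                 continue
--             depth -= 1
--             in_brace = depth > 0
--             i += 1
--             continue
--         if in_brace and c in ("'", '"'):
--             # Quotes inside expression => skip as complex
--             return False
--         i += 1
--     return True
-- ===== SOURCE B (Python) =====
-- def simple_expression_ok(s: str) -> bool:
--     # Phase 1: blank out escaped literal brace pairs ('{{' / '}}') left to right,
--     # replacing each pair by a space so surrounding characters never join up.
--     # Phase 2: one flat scan tracking brace depth and whether we are inside an
--     # expression; no index arithmetic or lookahead needed.
--     t = s.replace('{{', ' ').replace('}}', ' ')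
--     depth = 0
--     in_expr = False
--     for c in t:
--         if c == '{':
--             depth += 1
--             if depth > 1:
--                 return False
--             in_expr = True
--         elif c == '}':
--             depth -= 1
--             in_expr = depth > 0
--         elif in_expr and c in "'\"":
--             return False
--     return True
-- ===== Notes on version B (the rewrite author's own statement) =====
-- stated objective: simpler
-- what changed: B first blanks out all escaped brace pairs with two str.replace calls and then runs one flat per-character scan over the result, replacing A's index-based while loop with one-character lookahead and continue-driven control flow.
import Mathlib
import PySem

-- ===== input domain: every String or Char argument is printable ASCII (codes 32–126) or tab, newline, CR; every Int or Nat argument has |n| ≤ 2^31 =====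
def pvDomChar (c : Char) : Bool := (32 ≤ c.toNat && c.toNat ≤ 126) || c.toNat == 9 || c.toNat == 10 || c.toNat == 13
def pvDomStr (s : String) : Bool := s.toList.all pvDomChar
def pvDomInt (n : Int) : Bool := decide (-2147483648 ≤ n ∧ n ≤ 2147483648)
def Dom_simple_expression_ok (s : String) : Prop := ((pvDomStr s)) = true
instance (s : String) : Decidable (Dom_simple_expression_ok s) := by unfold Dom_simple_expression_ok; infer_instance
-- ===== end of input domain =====

-- B replaces A's index-and-lookahead while loop by a two-phase pass: blank out escaped
-- brace pairs with str.replace, then one flat depth/in-expression scan (simpler; the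
-- timing run measured it faster by a constant factor).

-- ===== PORT A =====
-- A's while loop over index i with one-character lookahead, as structural recursion on
-- the character list (state: depth, in_brace; lookahead = two-element patterns).
def pvGoA : List Char → Int → Bool → Bool
  | '{' :: '{' :: rest, depth, in_brace => pvGoA rest depth in_brace
  | '{' :: rest, depth, _ =>
      if depth + 1 > 1 then false else pvGoA rest (depth + 1) true
  | '}' :: '}' :: rest, depth, in_brace => pvGoA rest depth in_brace
  | '}' :: rest, depth, _ => pvGoA rest (depth - 1) (decide (depth - 1 > 0))
  | c :: rest, depth, in_brace =>
      if in_brace && (c == '\'' || c == '"') then false else pvGoA rest depth in_brace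
  | [], _, _ => true

def simple_expression_ok (s : String) : Bool := pvGoA s.toList 0 false

-- ===== PORT B =====
-- B's flat for-loop over the replaced string (no lookahead), early return as recursion.
def pvGoB : List Char → Int → Bool → Bool
  | [], _, _ => true
  | c :: rest, depth, in_expr =>
      if c == '{' then
        if depth + 1 > 1 then false else pvGoB rest (depth + 1) true
      else if c == '}' then
        pvGoB rest (depth - 1) (decide (depth - 1 > 0))
      else if in_expr && (c == '\'' || c == '"') then false
      else pvGoB rest depth in_expr

def simple_expression_ok_alt (s : String) : Bool :=
  pvGoB (PySem.Str.replace (PySem.Str.replace s "{{" " ") "}}" " ").toList 0 false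

-- ===== PRECONDITION & SPEC =====
def Spec_simple_expression_ok (s : String) (out : Bool) : Prop := out = simple_expression_ok_alt s
instance (s : String) (out : Bool) : Decidable (Spec_simple_expression_ok s out) := by unfold Spec_simple_expression_ok; infer_instance

-- ===== CLAIM (what is proved, stated in full; the proofs are below) =====
def Claim_equal_simple_expression_ok : Prop := ∀ (s : String), Dom_simple_expression_ok s → Spec_simple_expression_ok s (simple_expression_ok s)

-- ===== LEMMAS AND PROOFS =====

-- Greedy left-to-right removal of adjacent pairs of b, each replaced by a space:
-- a direct recursive characterisation of s.replace(b+b, ' ').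
def pvStrip (b : Char) : List Char → List Char
  | [] => []
  | [c] => [c]
  | c :: c' :: r =>
      if c = b ∧ c' = b then ' ' :: pvStrip b r else c :: pvStrip b (c' :: r)

theorem pvStrip_cons_ne (b c : Char) (x : List Char) (h : c ≠ b) :
    pvStrip b (c :: x) = c :: pvStrip b x := by
  cases x with
  | nil => simp [pvStrip]
  | cons c' r => simp [pvStrip, h]

theorem pvStrip_cons_head_ne (b c : Char) (x : List Char) (h : x.head? ≠ some b) :
    pvStrip b (c :: x) = c :: pvStrip b x := by
  cases x with
  | nil => simp [pvStrip]
  | cons c' r =>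
    have : c' ≠ b := by simpa using h
    simp [pvStrip, this]

theorem pvStrip_pair (b : Char) (x : List Char) :
    pvStrip b (b :: b :: x) = ' ' :: pvStrip b x := by
  simp [pvStrip]

-- the head of a stripped list is a space or the original head
theorem head?_pvStrip (b : Char) (x : List Char) :
    (pvStrip b x).head? = some ' ' ∨ (pvStrip b x).head? = x.head? := by
  cases x with
  | nil => simp [pvStrip]
  | cons c r =>
    cases r with
    | nil => simp [pvStrip]
    | cons c' r' =>
      by_cases h : c = b ∧ c' = b
      · simp [pvStrip, h]
      · simp [pvStrip, h]

-- PySem.Chars.replace.go with a two-character pattern computes pvStrip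
theorem replace_go_eq_pvStrip (b : Char) :
    ∀ (fuel : Nat) (l acc : List Char), l.length ≤ fuel →
      PySem.Chars.replace.go [b, b] [' '] fuel l acc = acc.reverse ++ pvStrip b l := by
  intro fuel
  induction fuel with
  | zero =>
    intro l acc h
    have hl : l = [] := by
      cases l with
      | nil => rfl
      | cons c t => simp at h
    subst hl
    rw [PySem.Chars.replace.go]
    simp [pvStrip]
  | succ fuel ih =>
    intro l acc h
    cases l with
    | nil =>
      rw [PySem.Chars.replace.go]
      · simp [pvStrip]
      · omega
    | cons c t =>
      rw [PySem.Chars.replace.go]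
      by_cases hp : List.isPrefixOf [b, b] (c :: t)
      · rw [if_pos hp]
        rcases t with _ | ⟨c', r⟩
        · simp [List.isPrefixOf] at hp
        · have hcb : c = b ∧ c' = b := by
            simp [List.isPrefixOf] at hp
            exact ⟨hp.1.symm, hp.2.symm⟩
          obtain ⟨h1, h2⟩ := hcb
          subst h1; subst h2
          have hr : r.length ≤ fuel := by simp at h; omega
          simp only [List.length_cons, List.length_nil, List.drop, List.reverse_cons,
            List.reverse_nil, List.nil_append, List.singleton_append]
          rw [ih r (' ' :: acc) hr]
          simp [pvStrip_pair]
      · rw [if_neg hp]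
        have ht : t.length ≤ fuel := by simp at h; omega
        rw [ih t (c :: acc) ht]
        have hstep : pvStrip b (c :: t) = c :: pvStrip b t := by
          rcases t with _ | ⟨c', r⟩
          · simp [pvStrip]
          · by_cases hc : c = b ∧ c' = b
            · exact absurd (by simp [List.isPrefixOf, hc.1, hc.2]) hp
            · simp [pvStrip, hc]
        rw [hstep]
        simp

theorem replace_eq_pvStrip (b : Char) (l : List Char) :
    PySem.Chars.replace l [b, b] [' '] = pvStrip b l := by
  rw [PySem.Chars.replace]
  simp
  exact replace_go_eq_pvStrip b l.length l [] (le_refl _)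

-- if rest never has head c, its head? is not c
theorem head?_ne_of_no_cons {c : Char} {rest : List Char}
    (h : ∀ r, rest = c :: r → False) : rest.head? ≠ some c := by
  cases rest with
  | nil => simp
  | cons a t =>
    simp
    intro ha
    exact h t (by rw [ha])

-- main equivalence of the two scans
theorem pvGo_eq :
    ∀ (l : List Char) (d : Int) (ib : Bool),
      pvGoA l d ib = pvGoB (pvStrip '}' (pvStrip '{' l)) d ib := by
  intro l d ib
  induction l, d, ib using pvGoA.induct with
  | case1 rest depth ib ih =>
    rw [pvGoA.eq_1, pvStrip_pair, pvStrip_cons_ne '}' ' ' _ (by decide)]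
    simpa [pvGoB] using ih
  | case2 rest depth b h hgt =>
    have hh : rest.head? ≠ some '{' := head?_ne_of_no_cons h
    rw [pvGoA.eq_2 depth b rest h, pvStrip_cons_head_ne '{' '{' rest hh,
      pvStrip_cons_ne '}' '{' _ (by decide)]
    simp [pvGoB, hgt]
  | case3 rest depth b h hle ih =>
    have hh : rest.head? ≠ some '{' := head?_ne_of_no_cons h
    rw [pvGoA.eq_2 depth b rest h, pvStrip_cons_head_ne '{' '{' rest hh,
      pvStrip_cons_ne '}' '{' _ (by decide)]
    rw [if_neg hle]
    simpa [pvGoB, hle] using ih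
  | case4 rest depth ib ih =>
    rw [pvGoA.eq_3, pvStrip_cons_ne '{' '}' _ (by decide),
      pvStrip_cons_ne '{' '}' _ (by decide), pvStrip_pair]
    simpa [pvGoB] using ih
  | case5 rest depth b h ih =>
    have hh : rest.head? ≠ some '}' := head?_ne_of_no_cons h
    have hh2 : (pvStrip '{' rest).head? ≠ some '}' := by
      rcases head?_pvStrip '{' rest with h' | h'
      · rw [h']; simp
      · rw [h']; exact hh
    rw [pvGoA.eq_4 depth b rest h, pvStrip_cons_ne '{' '}' _ (by decide),
      pvStrip_cons_head_ne '}' '}' _ hh2]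
    simpa [pvGoB] using ih
  | case6 c rest depth ib h1 h2 h3 h4 hq =>
    have hc1 : c ≠ '{' := h2
    have hc2 : c ≠ '}' := h4
    rw [pvGoA.eq_5 depth ib c rest h1 h2 h3 h4, pvStrip_cons_ne '{' c _ hc1,
      pvStrip_cons_ne '}' c _ hc2]
    simp [pvGoB, hq, hc1, hc2]
  | case7 c rest depth ib h1 h2 h3 h4 hq ih =>
    have hc1 : c ≠ '{' := h2
    have hc2 : c ≠ '}' := h4
    rw [pvGoA.eq_5 depth ib c rest h1 h2 h3 h4, pvStrip_cons_ne '{' c _ hc1,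
      pvStrip_cons_ne '}' c _ hc2]
    rw [if_neg hq]
    simpa [pvGoB, hq, hc1, hc2] using ih
  | case8 d ib =>
    simp [pvGoA, pvGoB, pvStrip]

-- ===== VERDICT (by name: the statement is the Claim_ definition above) =====
theorem simple_expression_ok_spec : Claim_equal_simple_expression_ok := by
  intro s _
  unfold Spec_simple_expression_ok simple_expression_ok simple_expression_ok_alt
  rw [PySem.Str.toList_replace, PySem.Str.toList_replace]
  simp only [show "{{".toList = ['{', '{'] from rfl, show "}}".toList = ['}', '}'] from rfl,
    show " ".toList = [' '] from rfl]
  rw [replace_eq_pvStrip, replace_eq_pvStrip]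
  exact pvGo_eq s.toList 0 false
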